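-- pv_equiv track=rewrite | github.com/AskhatTokombayev/Algorithms | Chapter3/Disjoint n.py | disjoint
-- ===== SOURCE A (Python) =====
-- def disjoint(A,B,C):
--     for a in A:
--         for b in B:
--             if a == b:
--                 for c in C:
--                     if a == c:
--                         return False
--     return True
-- ===== SOURCE B (Python) =====
-- def disjoint(A, B, C):
--     return not (set(A) & set(B) & set(C))
-- ===== Notes on version B (the rewrite author's own statement) =====
-- stated objective: idiomatic
-- what changed: Replaces the three-deep nested equality scan with the standard-library set intersection: the three lists are disjoint iff set(A) & set(B) & set(C) is empty.
import Mathlib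
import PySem

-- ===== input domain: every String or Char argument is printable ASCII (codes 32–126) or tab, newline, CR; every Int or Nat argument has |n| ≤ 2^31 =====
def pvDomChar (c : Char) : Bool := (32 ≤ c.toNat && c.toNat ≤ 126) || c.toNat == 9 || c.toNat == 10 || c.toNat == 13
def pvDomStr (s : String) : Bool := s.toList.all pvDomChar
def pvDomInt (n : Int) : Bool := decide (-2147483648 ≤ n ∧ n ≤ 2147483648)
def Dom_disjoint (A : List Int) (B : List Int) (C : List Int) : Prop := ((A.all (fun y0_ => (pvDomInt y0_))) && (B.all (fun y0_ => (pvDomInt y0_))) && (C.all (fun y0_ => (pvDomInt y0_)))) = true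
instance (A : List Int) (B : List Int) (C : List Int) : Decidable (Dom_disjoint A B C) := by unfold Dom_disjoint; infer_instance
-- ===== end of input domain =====

-- B replaces the three-deep nested equality scan by the idiomatic set intersection: disjoint iff set(A) & set(B) & set(C) is empty.
-- ===== PORT A =====
-- inner loop over C: true iff "return False" fires (some c with a == c)
def dLoopC (a : Int) (C : List Int) : Bool :=
  match C with
  | [] => false
  | c :: cs => if a == c then true else dLoopC a cs

-- middle loop over B: true iff "return False" fires for this a
def dLoopB (a : Int) (B C : List Int) : Bool :=
  match B with
  | [] => false
  | b :: bs => if a == b then (if dLoopC a C then true else dLoopB a bs C) else dLoopB a bs C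

def disjoint (A : List Int) (B : List Int) (C : List Int) : Bool :=
  match A with
  | [] => true
  | a :: as_ => if dLoopB a B C then false else disjoint as_ B C

-- ===== PORT B =====
-- B: not (set(A) & set(B) & set(C))
def disjoint_alt (A : List Int) (B : List Int) (C : List Int) : Bool :=
  (PySem.Set.inter (PySem.Set.inter (PySem.Set.ofList A) (PySem.Set.ofList B)) (PySem.Set.ofList C)).isEmpty

-- ===== PRECONDITION & SPEC =====
def Spec_disjoint (A : List Int) (B : List Int) (C : List Int) (out : Bool) : Prop := out = disjoint_alt A B C
instance (A : List Int) (B : List Int) (C : List Int) (out : Bool) : Decidable (Spec_disjoint A B C out) := by unfold Spec_disjoint; infer_instance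

-- ===== CLAIM (what is proved, stated in full; the proofs are below) =====
def Claim_equal_disjoint : Prop := ∀ (A : List Int) (B : List Int) (C : List Int), Dom_disjoint A B C → Spec_disjoint A B C (disjoint A B C)

-- ===== LEMMAS AND PROOFS =====
theorem dLoopC_eq (a : Int) (C : List Int) : dLoopC a C = C.any (fun c => c == a) := by
  induction C with
  | nil => rfl
  | cons c cs ih =>
    simp only [dLoopC, List.any_cons]
    by_cases h : a = c
    · simp [h]
    · have h2 : ¬ c = a := fun e => h (Eq.symm e)
      simp [h, h2, ih]

theorem dLoopB_eq (a : Int) (B C : List Int) :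
    dLoopB a B C = (B.any (fun b => a == b) && C.any (fun c => c == a)) := by
  induction B with
  | nil => rfl
  | cons b bs ih =>
    simp only [dLoopB, List.any_cons]
    by_cases h : a = b
    · rw [dLoopC_eq]
      rcases hC : C.any (fun c => c == a) with _ | _
      · simp [hC, ih]
      · simp [h, hC]
    · have hb : (a == b) = false := by simp [h]
      simp [hb, ih]

theorem disjoint_eq (A B C : List Int) :
    disjoint A B C = !(A.any (fun a => B.any (fun b => a == b) && C.any (fun c => c == a))) := by
  induction A with
  | nil => rfl
  | cons a as_ ih =>
    simp only [disjoint, List.any_cons]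
    rcases h : dLoopB a B C with _ | _ <;>
      simp [← dLoopB_eq, h, ih]

-- ===== VERDICT (by name: the statement is the Claim_ definition above) =====
theorem disjoint_spec : Claim_equal_disjoint := by
  intro A B C _
  unfold Spec_disjoint disjoint_alt
  rw [disjoint_eq, Bool.eq_iff_iff]
  simp [PySem.Set.inter, PySem.Set.contains, List.isEmpty_iff, List.filter_eq_nil_iff,
        PySem.Set.mem_ofList, List.any_eq_true]
  tauto
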